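-- pv_equiv track=rewrite | github.com/luv1327/Scaler_Dsa | IntermediateDsa1/introductionToArrays.py | findGreater
-- ===== SOURCE A (Python) =====
-- def findGreater(A):
--     n = len(A)
--     max_element = A[0]
--     for i in range(1,n):
--         max_element = max(max_element,A[i])
--     max_count = 0
--     for i in range(n):
--         if max_element == A[i]:
--             max_count +=1
--     return len(A) - max_count
-- ===== SOURCE B (Python) =====
-- def findGreater(A):
--     max_element = A[0]
--     count = 1
--     for a in A[1:]:
--         if a > max_element:
--             max_element = a
--             count = 1
--         elif a == max_element:
--             count += 1
--     return len(A) - count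
-- ===== Notes on version B (the rewrite author's own statement) =====
-- stated objective: alternative
-- what changed: B replaces A's two sequential scans (find the maximum, then count its occurrences) with a single pass maintaining the current maximum and a running count that resets to 1 whenever a new maximum appears.
import Mathlib
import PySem

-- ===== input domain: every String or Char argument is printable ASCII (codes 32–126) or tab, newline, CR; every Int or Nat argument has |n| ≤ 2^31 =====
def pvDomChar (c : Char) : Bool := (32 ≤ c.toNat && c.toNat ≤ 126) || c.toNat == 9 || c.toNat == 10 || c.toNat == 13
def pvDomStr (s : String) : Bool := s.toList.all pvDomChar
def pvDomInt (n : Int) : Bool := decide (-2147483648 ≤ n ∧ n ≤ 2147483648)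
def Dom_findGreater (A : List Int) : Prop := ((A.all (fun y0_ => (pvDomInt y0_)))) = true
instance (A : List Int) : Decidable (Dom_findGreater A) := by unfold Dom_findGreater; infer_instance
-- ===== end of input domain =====

-- B folds A's two scans (find max, then count it) into one pass maintaining the current
-- maximum and a running count reset on a new maximum; alternative decomposition, same cost.


-- ===== PORT A =====
-- The first element is read under Pre_ (A nonempty); range(1,n) visits exactly the elements of A.drop 1,
-- range(n) exactly the elements of A, so the index loops are the corresponding element folds.
def findGreater (A : List Int) : Int :=
  let max0 := (PySem.List.pyGet? A 0).getD 0   -- element 0; none (IndexError) excluded by Pre_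
  let max_element := (A.drop 1).foldl (fun m a => max m a) max0
  let max_count := A.foldl (fun c a => if max_element = a then c + 1 else c) (0 : Int)
  (A.length : Int) - max_count

-- ===== PORT B =====
def findGreater_alt (A : List Int) : Int :=
  match A with
  | [] => 0        -- unreachable under Pre_: B's Python also raises on []
  | x :: rest =>
    let st := rest.foldl
      (fun (p : Int × Int) a =>
        if a > p.1 then (a, 1) else if a = p.1 then (p.1, p.2 + 1) else p)
      (x, 1)
    (A.length : Int) - st.2

-- ===== PRECONDITION & SPEC =====
-- Pre_ excludes the empty list, on which both Pythons raise IndexError reading the first element.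
def Pre_findGreater (A : List Int) : Prop := A ≠ []
instance (A : List Int) : Decidable (Pre_findGreater A) := by unfold Pre_findGreater; infer_instance
def pvWitness_findGreater : List Int := ([1, 3, 2, 3])

def Spec_findGreater (A : List Int) (out : Int) : Prop := out = findGreater_alt A
instance (A : List Int) (out : Int) : Decidable (Spec_findGreater A out) := by unfold Spec_findGreater; infer_instance

-- ===== CLAIM (what is proved, stated in full; the proofs are below) =====
def Claim_equal_findGreater : Prop := ∀ (A : List Int), Dom_findGreater A → Pre_findGreater A → Spec_findGreater A (findGreater A)

-- ===== LEMMAS AND PROOFS =====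

-- A's count loop computes c0 + (number of occurrences of M in l).
lemma countFold (l : List Int) (M : Int) (c0 : Int) :
    l.foldl (fun c a => if M = a then c + 1 else c) c0 = c0 + (l.count M : Int) := by
  induction l generalizing c0 with
  | nil => simp
  | cons a t ih =>
    simp only [List.foldl_cons, List.count_cons, ih]
    by_cases h : M = a
    · simp [h]; ring
    · simp [h, Ne.symm h]

-- B's loop invariant: from state (m, c) it reaches (M, C) with M the running maximum and
-- C = (count of M in l) + (c if the maximum did not change, else 0).

lemma foldBspec (l : List Int) (m c : Int) :
    l.foldl
      (fun (p : Int × Int) a =>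
        if a > p.1 then (a, 1) else if a = p.1 then (p.1, p.2 + 1) else p)
      (m, c)
    = (l.foldl max m,
       (l.count (l.foldl max m) : Int) + (if l.foldl max m = m then c else 0)) := by
  induction l generalizing m c with
  | nil => simp
  | cons a t ih =>
    simp only [List.foldl_cons]
    by_cases h1 : a > m
    · rw [if_pos h1, ih]
      simp only [show max m a = a from max_eq_right (le_of_lt h1)]
      have hge := (PySem.List.le_foldl_max t a).1
      rw [if_neg (by omega : ¬ t.foldl max a = m)]
      simp only [Prod.mk.injEq, true_and, List.count_cons]
      by_cases h2 : t.foldl max a = a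
      · simp [h2]
      · simp [h2, Ne.symm h2]
    · by_cases h2 : a = m
      · rw [if_neg h1, if_pos h2, ih]
        subst h2
        simp only [max_self]
        simp only [Prod.mk.injEq, true_and, List.count_cons]
        by_cases h3 : t.foldl max a = a
        · simp [h3]; ring
        · simp [h3, Ne.symm h3]
      · rw [if_neg h1, if_neg h2, ih]
        simp only [show max m a = m from max_eq_left (by omega)]
        have hge := (PySem.List.le_foldl_max t m).1
        simp only [Prod.mk.injEq, true_and, List.count_cons]
        rw [if_neg (show ¬ (a == t.foldl max m) = true by simp; omega)]
        simp

-- ===== VERDICT (by name: the statement is the Claim_ definition above) =====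
theorem findGreater_spec : Claim_equal_findGreater := by
  intro A _hDom hPre
  unfold Spec_findGreater findGreater findGreater_alt
  match A with
  | [] => exact absurd rfl hPre
  | x :: rest =>
    have hx : (PySem.List.pyGet? (x :: rest) 0).getD 0 = x := by
      simp [PySem.List.pyGet?, PySem.List.pyIdx?]
    simp only [hx, List.drop_one, List.tail_cons, foldBspec, countFold, List.count_cons]
    have hge := (PySem.List.le_foldl_max rest x).1
    by_cases h : rest.foldl max x = x
    · simp only [h, beq_self_eq_true, if_pos]
      push_cast; ring
    · have hxb : (x == rest.foldl max x) = false := by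
        simp; omega
      simp only [if_neg h, hxb]
      push_cast; ring
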